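-- pv_equiv track=rewrite | github.com/devmindtan/DataStructures-Algorithms | GeeksForGeeks/DSA Tutorial/Two Pointers/Basic/Reverse a string with spaces intact.py | reverseWithSpacesIntact
-- ===== SOURCE A (Python) =====
-- def reverseWithSpacesIntact(s):
--     s = list(s)
--     l = 0
--     r = len(s) - 1
--     while l <= r:
--         if (s[l] == " "):
--             l += 1
--         elif (s[r] == " "):
--             r -= 1
--         else:
--             s[l], s[r] = s[r], s[l]
--             l += 1
--             r -= 1
--     return "".join(s)
-- ===== SOURCE B (Python) =====
-- def reverseWithSpacesIntact(s):
--     rev = [c for c in s if c != ' '][::-1]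
--     it = iter(rev)
--     return ''.join(' ' if c == ' ' else next(it) for c in s)
-- ===== Notes on version B (the rewrite author's own statement) =====
-- stated objective: simpler
-- what changed: Replaces the converging two-pointer in-place swap with a filter-then-reverse of the non-space characters merged back in one forward pass over the string.
import Mathlib
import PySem

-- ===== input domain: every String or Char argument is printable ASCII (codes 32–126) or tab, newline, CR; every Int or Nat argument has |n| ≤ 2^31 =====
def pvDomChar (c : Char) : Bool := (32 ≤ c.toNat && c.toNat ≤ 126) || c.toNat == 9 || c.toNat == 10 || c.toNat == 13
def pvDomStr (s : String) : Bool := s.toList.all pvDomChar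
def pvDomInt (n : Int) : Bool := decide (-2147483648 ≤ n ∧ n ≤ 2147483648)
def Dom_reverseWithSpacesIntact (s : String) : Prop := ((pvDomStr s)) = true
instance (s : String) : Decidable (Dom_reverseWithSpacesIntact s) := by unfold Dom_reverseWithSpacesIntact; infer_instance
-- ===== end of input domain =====

-- B replaces A's converging two-pointer in-place swap by filtering the non-space
-- characters, reversing them, and merging them back in one forward pass (simpler).

-- ===== PORT A =====
-- the while loop of A: l/r converge, swapping non-space ends; indices are always
-- in range when reached from the initial call, so getD's default is never used
def loopA (cs : List Char) (l r : Int) : List Char :=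
  if l ≤ r then
    if cs.getD l.toNat ' ' = ' ' then loopA cs (l + 1) r
    else if cs.getD r.toNat ' ' = ' ' then loopA cs l (r - 1)
    else loopA ((cs.set l.toNat (cs.getD r.toNat ' ')).set r.toNat (cs.getD l.toNat ' '))
           (l + 1) (r - 1)
  else cs
termination_by (r + 1 - l).toNat
decreasing_by all_goals omega

def reverseWithSpacesIntact (s : String) : String :=
  String.ofList (loopA s.toList 0 ((s.toList.length : Int) - 1))

-- ===== PORT B =====
-- merge pass: spaces stay, otherwise take the next char of the reversed list
def mergeB : List Char → List Char → List Char
  | [], _ => []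
  | c :: cs, rev =>
    if c = ' ' then ' ' :: mergeB cs rev
    else match rev with
      | r :: rs => r :: mergeB cs rs
      | [] => []   -- unreachable: rev has exactly as many chars as the non-spaces of cs

def reverseWithSpacesIntact_alt (s : String) : String :=
  String.ofList (mergeB s.toList ((s.toList.filter (fun c => c ≠ ' ')).reverse))

-- ===== PRECONDITION & SPEC =====
def Spec_reverseWithSpacesIntact (s : String) (out : String) : Prop := out = reverseWithSpacesIntact_alt s
instance (s : String) (out : String) : Decidable (Spec_reverseWithSpacesIntact s out) := by unfold Spec_reverseWithSpacesIntact; infer_instance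

-- ===== CLAIM (what is proved, stated in full; the proofs are below) =====
def Claim_equal_reverseWithSpacesIntact : Prop := ∀ (s : String), Dom_reverseWithSpacesIntact s → Spec_reverseWithSpacesIntact s (reverseWithSpacesIntact s)

-- ===== LEMMAS AND PROOFS =====

-- B applied to a plain char list
def spaceRev (m : List Char) : List Char :=
  mergeB m ((m.filter (fun c => c ≠ ' ')).reverse)

lemma mergeB_space_cons (xs rev : List Char) :
    mergeB (' ' :: xs) rev = ' ' :: mergeB xs rev := by
  simp [mergeB]

lemma mergeB_cons (c : Char) (hc : c ≠ ' ') (xs rs : List Char) (r : Char) :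
    mergeB (c :: xs) (r :: rs) = r :: mergeB xs rs := by
  simp [mergeB, hc]

-- appending a trailing space passes through the merge when rev is long enough
lemma mergeB_append_space (xs : List Char) : ∀ rev : List Char,
    (xs.filter (fun c => c ≠ ' ')).length ≤ rev.length →
    mergeB (xs ++ [' ']) rev = mergeB xs rev ++ [' '] := by
  induction xs with
  | nil => intro rev _; simp [mergeB]
  | cons c cs ih =>
    intro rev h
    by_cases hc : c = ' '
    · subst hc
      rw [List.cons_append, mergeB_space_cons, mergeB_space_cons,
        ih rev (by simpa using h)]
      simp
    · cases rev with
      | nil => simp [hc] at h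
      | cons r rs =>
        have h' : (cs.filter (fun c => c ≠ ' ')).length ≤ rs.length := by
          simpa [hc] using h
        rw [List.cons_append, mergeB_cons c hc _ rs r, mergeB_cons c hc cs rs r,
          ih rs h']
        simp

-- a trailing non-space consumes the last rev element when lengths match exactly
lemma mergeB_append_last (d c : Char) (hd : d ≠ ' ') (xs : List Char) :
    ∀ rev : List Char, (xs.filter (fun x => x ≠ ' ')).length = rev.length →
    mergeB (xs ++ [d]) (rev ++ [c]) = mergeB xs rev ++ [c] := by
  induction xs with
  | nil =>
    intro rev h
    have : rev = [] := by
      cases rev with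
      | nil => rfl
      | cons r rs => simp at h
    subst this; simp [mergeB, hd]
  | cons x t ih =>
    intro rev h
    by_cases hx : x = ' '
    · subst hx
      rw [List.cons_append, mergeB_space_cons, mergeB_space_cons,
        ih rev (by simpa using h)]
      simp
    · cases rev with
      | nil => simp [hx] at h
      | cons r rs =>
        have h' : (t.filter (fun x => x ≠ ' ')).length = rs.length := by
          simpa [hx] using h
        rw [List.cons_append, List.cons_append, mergeB_cons x hx _ _ r,
          mergeB_cons x hx t rs r, ih rs h']
        simp

lemma spaceRev_nil : spaceRev [] = [] := rfl

lemma spaceRev_single (c : Char) (hc : c ≠ ' ') : spaceRev [c] = [c] := by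
  simp [spaceRev, hc, mergeB]

lemma spaceRev_space_cons (m : List Char) : spaceRev (' ' :: m) = ' ' :: spaceRev m := by
  simp [spaceRev, mergeB_space_cons]

lemma spaceRev_append_space (m : List Char) : spaceRev (m ++ [' ']) = spaceRev m ++ [' '] := by
  have := mergeB_append_space m ((m.filter (fun c => c ≠ ' ')).reverse) (by simp)
  simpa [spaceRev, List.filter_append] using this

lemma spaceRev_swap (c d : Char) (hc : c ≠ ' ') (hd : d ≠ ' ') (mid : List Char) :
    spaceRev (c :: (mid ++ [d])) = d :: (spaceRev mid ++ [c]) := by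
  have hfil : ((c :: (mid ++ [d])).filter (fun x => x ≠ ' ')).reverse
      = d :: ((mid.filter (fun x => x ≠ ' ')).reverse ++ [c]) := by
    simp [List.filter_append, hc, hd]
  unfold spaceRev
  rw [hfil, mergeB_cons c hc,
      mergeB_append_last d c hd mid ((mid.filter (fun x => x ≠ ' ')).reverse) (by simp)]

-- index/getD/set helpers on p ++ c :: t at position p.length
lemma getD_mid (p t : List Char) (c x : Char) : (p ++ c :: t).getD p.length x = c := by
  simp [List.getD]

lemma set_mid (p t : List Char) (c x : Char) : (p ++ c :: t).set p.length x = p ++ x :: t := by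
  induction p with
  | nil => simp
  | cons a as ih => simp [ih]

-- the central invariant: the loop applied to the middle segment produces B's transform
lemma loopA_eq_spaceRev : ∀ (n : Nat) (m p q : List Char), m.length = n →
    loopA (p ++ m ++ q) (p.length : Int) ((p.length : Int) + m.length - 1)
      = p ++ spaceRev m ++ q := by
  intro n
  induction n using Nat.strong_induction_on with
  | _ n ih =>
    intro m p q hm
    cases m with
    | nil =>
      rw [loopA]
      simp [spaceRev_nil]
    | cons c m' =>
      by_cases hc : c = ' '
      · -- left char is a space: advance l
        subst hc
        rw [loopA]
        have hgl : (p ++ (' ' :: m') ++ q).getD ((p.length : Int)).toNat ' ' = ' ' := by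
          simp
        have hle : (p.length : Int) ≤ (p.length : Int) + (' ' :: m').length - 1 := by
          simp only [List.length_cons]; push_cast; omega
        rw [if_pos hle, if_pos hgl]
        have hre : (p ++ (' ' :: m') ++ q) = (p ++ [' ']) ++ m' ++ q := by simp
        have harith : (p.length : Int) + 1 = ((p ++ [' ']).length : Int) := by simp
        have harith2 : (p.length : Int) + (' '::m').length - 1
            = (((p ++ [' ']).length : Nat) : Int) + m'.length - 1 := by simp only [List.length_append, List.length_cons, List.length_nil]; push_cast; omega
        rw [hre, harith, harith2, ih m'.length (by simp [← hm]) m' (p ++ [' ']) q rfl]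
        simp [spaceRev_space_cons]
      · rcases m'.eq_nil_or_concat with h' | ⟨mid, d, h'⟩
        · -- single non-space char: swap with itself, then pointers cross
          subst h'
          rw [loopA]
          have hltoNat : ((p.length : Int)).toNat = p.length := by simp
          have hg : (p ++ [c] ++ q).getD ((p.length : Int)).toNat ' ' = c := by
            have e : p ++ [c] ++ q = p ++ c :: q := by simp
            rw [hltoNat, e]; exact getD_mid p q c ' '
          have hr : ((p.length : Int) + ([c] : List Char).length - 1) = (p.length : Int) := by
            simp
          rw [hr, if_pos le_rfl, hg, if_neg hc, if_neg hc]
          have hset : ((p ++ [c] ++ q).set ((p.length : Int)).toNat c).set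
              ((p.length : Int)).toNat c = p ++ [c] ++ q := by
            rw [hltoNat]
            have e : (p ++ [c] ++ q) = p ++ c :: q := by simp
            rw [e, set_mid p q c c, set_mid p q c c]
          rw [hset, loopA]
          have hno : ¬ ((p.length : Int) + 1 ≤ (p.length : Int) - 1) := by omega
          rw [if_neg hno]
          simp [spaceRev_single c hc]
        · rw [List.concat_eq_append] at h'
          subst h'
          by_cases hd : d = ' '
          · -- right char is a space: retreat r
            rw [loopA]
            have hgl : (p ++ (c :: (mid ++ [d])) ++ q).getD ((p.length : Int)).toNat ' ' = c := by
              simp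
            have hle : (p.length : Int) ≤ (p.length : Int) + (c :: (mid ++ [d])).length - 1 := by
              simp only [List.length_append, List.length_cons, List.length_nil]; push_cast; omega
            rw [if_pos hle, hgl, if_neg hc]
            subst hd
            have hre : (p ++ (c :: (mid ++ [' '])) ++ q) = p ++ (c :: mid) ++ (' ' :: q) := by
              simp
            have hgr : (p ++ (c :: mid) ++ (' ' :: q)).getD
                ((p.length : Int) + (c :: (mid ++ [' '])).length - 1).toNat ' ' = ' ' := by
              have e : ((p.length : Int) + (c :: (mid ++ [' '])).length - 1).toNat
                  = (p ++ (c :: mid)).length := by simp only [List.length_append, List.length_cons, List.length_nil]; push_cast; omega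
              rw [e]
              exact getD_mid (p ++ (c :: mid)) q ' ' ' '
            rw [hre, if_pos hgr]
            have harith : (p.length : Int) + (c :: (mid ++ [' '])).length - 1 - 1
                = (p.length : Int) + (c :: mid).length - 1 := by simp only [List.length_append, List.length_cons, List.length_nil]; push_cast; omega
            rw [harith, ih (c :: mid).length (by simp [← hm]) (c :: mid) p (' ' :: q) rfl]
            have e2 : spaceRev (c :: (mid ++ [' '])) = spaceRev (c :: mid) ++ [' '] := by
              simpa using spaceRev_append_space (c :: mid)
            simp [e2]
          · -- both ends non-space: swap and recurse inward
            rw [loopA]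
            have hltoNat : ((p.length : Int)).toNat = p.length := by simp
            have hgl : (p ++ (c :: (mid ++ [d])) ++ q).getD ((p.length : Int)).toNat ' ' = c := by
              simp
            have hle : (p.length : Int) ≤ (p.length : Int) + (c :: (mid ++ [d])).length - 1 := by
              simp only [List.length_append, List.length_cons, List.length_nil]; push_cast; omega
            have hrtoNat : ((p.length : Int) + (c :: (mid ++ [d])).length - 1).toNat
                = (p ++ c :: mid).length := by simp only [List.length_append, List.length_cons, List.length_nil]; push_cast; omega
            have hgr : (p ++ (c :: (mid ++ [d])) ++ q).getD
                ((p.length : Int) + (c :: (mid ++ [d])).length - 1).toNat ' ' = d := by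
              have hre : (p ++ (c :: (mid ++ [d])) ++ q) = (p ++ c :: mid) ++ d :: q := by simp
              rw [hrtoNat, hre]; exact getD_mid (p ++ c :: mid) q d ' '
            rw [if_pos hle, hgl, if_neg hc, hgr, if_neg hd]
            have hset : ((p ++ (c :: (mid ++ [d])) ++ q).set ((p.length : Int)).toNat d).set
                ((p.length : Int) + (c :: (mid ++ [d])).length - 1).toNat c
                = (p ++ [d]) ++ mid ++ (c :: q) := by
              rw [hltoNat, hrtoNat]
              have e0 : (p ++ (c :: (mid ++ [d])) ++ q) = p ++ c :: (mid ++ [d] ++ q) := by simp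
              rw [e0, set_mid p (mid ++ [d] ++ q) c d]
              have e2 : (p ++ d :: (mid ++ [d] ++ q)) = (p ++ d :: mid) ++ d :: q := by simp
              have elen : (p ++ c :: mid).length = (p ++ d :: mid).length := by simp
              rw [e2, elen, set_mid (p ++ d :: mid) q d c]
              simp
            rw [hset]
            have harith : (p.length : Int) + 1 = (((p ++ [d]).length : Nat) : Int) := by
              simp
            have harith2 : (p.length : Int) + (c :: (mid ++ [d])).length - 1 - 1
                = (((p ++ [d]).length : Nat) : Int) + mid.length - 1 := by simp only [List.length_append, List.length_cons, List.length_nil]; push_cast; omega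
            rw [harith, harith2, ih mid.length (by simp [← hm]) mid (p ++ [d]) (c :: q) rfl]
            rw [spaceRev_swap c d hc hd mid]
            simp

-- ===== VERDICT (by name: the statement is the Claim_ definition above) =====
theorem reverseWithSpacesIntact_spec : Claim_equal_reverseWithSpacesIntact := by
  intro s _
  unfold Spec_reverseWithSpacesIntact reverseWithSpacesIntact reverseWithSpacesIntact_alt
  have h := loopA_eq_spaceRev s.toList.length s.toList [] [] rfl
  simp only [List.nil_append, List.append_nil, List.length_nil, Nat.cast_zero, zero_add] at h
  rw [h]
  rfl
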